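-- pv_equiv track=rewrite | github.com/Zorope/ITSC3155_Bryan | PythonBasics2/pythonBasics2.py | count_threes
-- ===== SOURCE A (Python) =====
-- def count_threes(n):
--   # YOUR CODE HERE
--   multiples = {}
--   multiples["3"] = 0
--   multiples["6"] = 0
--   multiples["9"] = 0
--   countThree = 0
--   countSix = 0
--   countNine = 0
--   maxCount = 0
--   current = 0
--   currentID = 0
--   # loops through the string
--   for i in n:
--     # if string is equal to 3 than we update our dictionary
--     if i == '3':
--       countThree += 1
--       up_dict = {"3":countThree}
--       multiples.update(up_dict)
--     # if string is equal to 6 than we update our dictionary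
--     elif i == '6':
--       countSix += 1
--       up_dict = {"6":countSix}
--       multiples.update(up_dict)
--     # if string is equal to 9 than we update our dictionary
--     elif i == '9':
--       countNine += 1
--       up_dict = {"9":countNine}
--       multiples.update(up_dict)
--   # Checks each value and sets currentID to the key with the most cases of showing up
--   for key,value in multiples.items():
--     current = value
--     if current > maxCount:
--       maxCount = current
--       currentID = key
--   return int(currentID)
-- ===== SOURCE B (Python) =====
-- def count_threes(n):
--     # Sort the 3/6/9 digits of n; the most frequent digit is the longest run,
--     # and ascending order '3' < '6' < '9' with a strict-greater run comparison
--     # reproduces A's 3>6>9 tie-break and the 0 default.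
--     ds = sorted(c for c in n if c in '369')
--     best = 0
--     bestlen = 0
--     run = 0
--     prev = ''
--     for c in ds:
--         run = run + 1 if c == prev else 1
--         prev = c
--         if run > bestlen:
--             bestlen = run
--             best = int(c)
--     return best
-- ===== Notes on version B (the rewrite author's own statement) =====
-- stated objective: alternative
-- what changed: Instead of counting 3/6/9 occurrences in a branchy Python loop with hand-maintained counters plus a dict and taking an argmax over the dict items, B filters the 3/6/9 characters out of the string, sorts them, and scans the sorted list for the longest run with a strict-greater comparison; ascending sort order plus strict comparison reproduces A's 3>6>9 tie-break and the 0 default without counters or a dict.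
import Mathlib
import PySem

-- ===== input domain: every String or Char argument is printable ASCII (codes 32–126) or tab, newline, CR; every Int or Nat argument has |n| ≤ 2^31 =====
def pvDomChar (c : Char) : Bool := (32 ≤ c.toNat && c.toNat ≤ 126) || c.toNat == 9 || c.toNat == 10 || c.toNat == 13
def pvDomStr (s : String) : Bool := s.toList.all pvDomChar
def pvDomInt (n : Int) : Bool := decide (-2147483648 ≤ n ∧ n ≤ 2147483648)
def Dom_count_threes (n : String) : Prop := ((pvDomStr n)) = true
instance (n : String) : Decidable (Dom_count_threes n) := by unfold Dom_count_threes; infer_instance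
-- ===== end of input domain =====

-- B replaces A's counting pass + dict + dict-items argmax scan with a different
-- algorithm: filter the 3/6/9 characters, sort them, and take the digit of the
-- longest run (strict-greater, so ascending order keeps A's 3>6>9 tie-break).

-- ===== PORT A =====
-- A's dict after the initial three insertions
def aInitDict : PySem.Dict String Int :=
  ((PySem.Dict.empty.insert "3" (0 : Int)).insert "6" 0).insert "9" 0

-- the body of A's 'for i in n' loop: state = (multiples, countThree, countSix, countNine)
def aStep (s : PySem.Dict String Int × Int × Int × Int) (i : Char) :
    PySem.Dict String Int × Int × Int × Int :=
  let (d, c3, c6, c9) := s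
  if i = '3' then (d.insert "3" (c3 + 1), c3 + 1, c6, c9)
  else if i = '6' then (d.insert "6" (c6 + 1), c3, c6 + 1, c9)
  else if i = '9' then (d.insert "9" (c9 + 1), c3, c6, c9 + 1)
  else s

-- the body of A's 'for key,value in multiples.items()' loop: state = (maxCount, currentID)
def aSel (acc : Int × Option String) (kv : String × Int) : Int × Option String :=
  if kv.2 > acc.1 then (kv.2, some kv.1) else acc

-- One pass over the string maintaining three counters and a dict overwritten in
-- place whenever a counter changes, then a scan of the dict's items taking the
-- strictly greatest value.  Python's currentID is int 0 until a key wins, then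
-- a key string; we carry it as Option String (none = the initial 0) and apply
-- int(...) at the end exactly as A does (int("3")/"6"/"9" via PySem.Int.ofStr?,
-- int(0) = 0).
def count_threes (n : String) : Int :=
  match ((n.toList.foldl aStep (aInitDict, 0, 0, 0)).1.items.foldl aSel (0, none)).2 with
  | none => 0
  | some k => (PySem.Int.ofStr? k).getD 0  -- int(key); A only stores "3"/"6"/"9", on which ofStr? is exact

-- ===== PORT B =====
-- the body of B's 'for c in ds' loop: state = (best, bestlen, run, prev);
-- prev is '' before the loop and a character afterwards: Option Char, none = ''.
def bStep (s : Int × Int × Int × Option Char) (c : Char) : Int × Int × Int × Option Char :=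
  let (best, bestlen, run, prev) := s
  let run' := if some c = prev then run + 1 else 1
  if run' > bestlen then ((PySem.Int.ofChars? [c]).getD 0, run', run', some c)
  else (best, bestlen, run', some c)
  -- int(c); B only reaches it for c ∈ "369", where ofChars? is exact

def count_threes_alt (n : String) : Int :=
  ((PySem.List.sorted (n.toList.filter (fun c => c ∈ ['3', '6', '9'])) (fun c => c) false).foldl
    bStep (0, 0, 0, none)).1

-- ===== PRECONDITION & SPEC =====
def Spec_count_threes (n : String) (out : Int) : Prop := out = count_threes_alt n
instance (n : String) (out : Int) : Decidable (Spec_count_threes n out) := by unfold Spec_count_threes; infer_instance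

-- ===== CLAIM (what is proved, stated in full; the proofs are below) =====
def Claim_equal_count_threes : Prop := ∀ (n : String), Dom_count_threes n → Spec_count_threes n (count_threes n)

-- ===== LEMMAS AND PROOFS =====

-- the common closed selector both programs compute: strict-greater argmax over
-- (3, a), (6, b), (9, c) with default 0
def sel3 (a b c : Int) : Int :=
  if max (max 0 a) b < c then 9 else if max 0 a < b then 6 else if 0 < a then 3 else 0

-- the dict A maintains is always the three fixed keys with the current counters
def mkd (c3 c6 c9 : Int) : PySem.Dict String Int :=
  PySem.Dict.mk [("3", c3), ("6", c6), ("9", c9)]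

-- A's counting fold, characterised: the dict always mirrors the counters and
-- each counter counts its digit.
theorem countA_fold (l : List Char) :
    ∀ (c3 c6 c9 : Int),
      l.foldl aStep (mkd c3 c6 c9, c3, c6, c9)
      = (mkd (c3 + l.count '3') (c6 + l.count '6') (c9 + l.count '9'),
         c3 + l.count '3', c6 + l.count '6', c9 + l.count '9') := by
  induction l with
  | nil => intro c3 c6 c9; simp [List.foldl]
  | cons x t ih =>
    intro c3 c6 c9
    simp only [List.foldl_cons]
    by_cases h3 : x = '3'
    · subst h3
      have hd : aStep (mkd c3 c6 c9, c3, c6, c9) '3' = (mkd (c3 + 1) c6 c9, c3 + 1, c6, c9) := by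
        simp [aStep, mkd, PySem.Dict.insert]
      rw [hd, ih]
      simp [mkd, Prod.mk.injEq, PySem.Dict.mk.injEq, List.cons.injEq]
      omega
    · by_cases h6 : x = '6'
      · subst h6
        have hd : aStep (mkd c3 c6 c9, c3, c6, c9) '6' = (mkd c3 (c6 + 1) c9, c3, c6 + 1, c9) := by
          simp [aStep, mkd, PySem.Dict.insert]
        rw [hd, ih]
        simp [mkd, Prod.mk.injEq, PySem.Dict.mk.injEq, List.cons.injEq]
        omega
      · by_cases h9 : x = '9'
        · subst h9
          have hd : aStep (mkd c3 c6 c9, c3, c6, c9) '9' = (mkd c3 c6 (c9 + 1), c3, c6, c9 + 1) := by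
            simp [aStep, mkd, PySem.Dict.insert]
          rw [hd, ih]
          simp [mkd, Prod.mk.injEq, PySem.Dict.mk.injEq, List.cons.injEq]
          omega
        · have hd : aStep (mkd c3 c6 c9, c3, c6, c9) x = (mkd c3 c6 c9, c3, c6, c9) := by
            simp [aStep, h3, h6, h9]
          rw [hd, ih]
          simp [h3, h6, h9]

-- A's dict-items selection scan computes sel3
theorem final_select (a b c : Int) :
    (match ((mkd a b c).items.foldl aSel (0, none)).2 with
     | none => (0 : Int)
     | some k => (PySem.Int.ofStr? k).getD 0) = sel3 a b c := by
  simp only [mkd, aSel, sel3, List.foldl]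
  have e3 : (PySem.Int.ofStr? "3").getD 0 = 3 := by decide
  have e6 : (PySem.Int.ofStr? "6").getD 0 = 6 := by decide
  have e9 : (PySem.Int.ofStr? "9").getD 0 = 9 := by decide
  split_ifs <;> simp_all <;> omega

-- digit value of a character, as B computes it
def dgt (c : Char) : Int := (PySem.Int.ofChars? [c]).getD 0

-- B's run fold over k+1 further copies of the current run's character
theorem midRun (c : Char) : ∀ (k : Nat) (best bestlen j : Int),
    (List.replicate (k + 1) c).foldl bStep (best, bestlen, j, some c)
    = (if bestlen < j + (k + 1 : Nat) then dgt c else best,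
       max bestlen (j + (k + 1 : Nat)), j + (k + 1 : Nat), some c) := by
  intro k
  induction k with
  | zero =>
    intro best bestlen j
    simp only [List.replicate, List.foldl_cons, List.foldl_nil, bStep, dgt]
    split_ifs <;> simp_all <;> omega
  | succ m ih =>
    intro best bestlen j
    have hrep : List.replicate (m + 1 + 1) c = c :: List.replicate (m + 1) c := rfl
    have hstep : bStep (best, bestlen, j, some c) c
        = (if bestlen < j + 1 then dgt c else best, max bestlen (j + 1), j + 1, some c) := by
      simp only [bStep, dgt]
      split_ifs <;> simp_all <;> omega
    rw [hrep, List.foldl_cons, hstep, ih]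
    simp only [Prod.mk.injEq]
    refine ⟨?_, ?_, ?_, trivial⟩
    · split_ifs <;> first | rfl | (exfalso; push_cast at *; omega)
    · push_cast; omega
    · push_cast; ring

-- B's fold over a fresh segment of k copies of c (previous character differs)
theorem segRun (c : Char) (prev : Option Char) (hprev : prev ≠ some c) :
    ∀ (k : Nat) (best bestlen run : Int), 0 ≤ bestlen →
    (List.replicate k c).foldl bStep (best, bestlen, run, prev)
    = (if bestlen < (k : Int) then dgt c else best, max bestlen (k : Int),
       if k = 0 then run else (k : Int), if k = 0 then prev else some c) := by
  intro k best bestlen run h0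
  cases k with
  | zero => simp; omega
  | succ m =>
    have hrep : List.replicate (m + 1) c = c :: List.replicate m c := rfl
    have hstep : bStep (best, bestlen, run, prev) c
        = (if bestlen < 1 then dgt c else best, max bestlen (1 : Int), 1, some c) := by
      simp only [bStep, dgt]
      have hne : (some c = prev) = False := by
        simp only [eq_iff_iff, iff_false]
        exact fun h => hprev h.symm
      split_ifs <;> simp_all <;> omega
    rw [hrep, List.foldl_cons, hstep]
    cases m with
    | zero =>
      simp only [List.replicate, List.foldl_nil, Prod.mk.injEq]
      refine ⟨?_, ?_, ?_, ?_⟩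
      · split_ifs <;> first | rfl | (exfalso; push_cast at *; omega)
      · push_cast; omega
      · simp
      · simp
    | succ p =>
      rw [midRun c p]
      simp only [Prod.mk.injEq]
      refine ⟨?_, ?_, ?_, ?_⟩
      · split_ifs <;> first | rfl | (exfalso; push_cast at *; omega)
      · push_cast; omega
      · simp; push_cast; ring
      · simp

-- the canonical sorted form of a 3/6/9-only list
def canon (a b c : Nat) : List Char :=
  List.replicate a '3' ++ List.replicate b '6' ++ List.replicate c '9'

theorem canon_perm (l : List Char) (hmem : ∀ x ∈ l, x ∈ ['3', '6', '9']) :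
    (canon (l.count '3') (l.count '6') (l.count '9')).Perm l := by
  rw [List.perm_iff_count]
  intro a
  simp only [canon, List.count_append, List.count_replicate]
  by_cases h3 : a = '3'
  · subst h3; simp
  · by_cases h6 : a = '6'
    · subst h6; simp
    · by_cases h9 : a = '9'
      · subst h9; simp
      · have hl : l.count a = 0 := by
          rw [List.count_eq_zero]
          intro ha
          have h := hmem a ha
          simp only [List.mem_cons, List.not_mem_nil, or_false] at h
          rcases h with h | h | h <;> simp_all
        have b3 : (('3' : Char) == a) = false := by simp [Ne.symm h3]
        have b6 : (('6' : Char) == a) = false := by simp [Ne.symm h6]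
        have b9 : (('9' : Char) == a) = false := by simp [Ne.symm h9]
        simp [b3, b6, b9, hl]

theorem canon_pairwise (a b c : Nat) : (canon a b c).Pairwise (· ≤ ·) := by
  unfold canon
  apply List.pairwise_append.mpr
  refine ⟨?_, List.pairwise_replicate.mpr (Or.inr le_rfl), ?_⟩
  · apply List.pairwise_append.mpr
    refine ⟨List.pairwise_replicate.mpr (Or.inr le_rfl),
            List.pairwise_replicate.mpr (Or.inr le_rfl), ?_⟩
    intro x hx y hy
    rw [List.mem_replicate] at hx hy
    rw [hx.2, hy.2]; decide
  · intro x hx y hy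
    rw [List.mem_replicate] at hy
    simp only [List.mem_append, List.mem_replicate] at hx
    rcases hx with ⟨_, hx⟩ | ⟨_, hx⟩ <;> rw [hx, hy.2] <;> decide

-- filtering on membership in "369" keeps each of those digits' counts
theorem count_filter_369 (l : List Char) (c : Char) (hc : c ∈ ['3', '6', '9']) :
    (l.filter (fun x => x ∈ ['3', '6', '9'])).count c = l.count c := by
  induction l with
  | nil => rfl
  | cons x t ih =>
    by_cases hx : x ∈ ['3', '6', '9'] <;> by_cases hxc : x = c <;>
      simp_all

-- B's whole computation equals sel3 on the three counts
theorem alt_eq_sel3 (n : String) :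
    count_threes_alt n
    = sel3 (n.toList.count '3') (n.toList.count '6') (n.toList.count '9') := by
  unfold count_threes_alt
  set l := n.toList.filter (fun c => c ∈ ['3', '6', '9']) with hl
  have hmem : ∀ x ∈ l, x ∈ ['3', '6', '9'] := by
    intro x hx
    rw [hl] at hx
    exact (List.mem_filter.mp hx).2 |> of_decide_eq_true
  have hsorted : PySem.List.sorted l (fun c => c) false
      = canon (l.count '3') (l.count '6') (l.count '9') :=
    PySem.List.sorted_id_eq_of_perm_of_pairwise l _ (canon_perm l hmem) (canon_pairwise _ _ _)
  have hc3 : l.count '3' = n.toList.count '3' := count_filter_369 _ _ (by decide)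
  have hc6 : l.count '6' = n.toList.count '6' := count_filter_369 _ _ (by decide)
  have hc9 : l.count '9' = n.toList.count '9' := count_filter_369 _ _ (by decide)
  rw [hsorted, hc3, hc6, hc9]
  unfold canon
  rw [List.foldl_append, List.foldl_append]
  rw [segRun '3' none (by simp) _ 0 0 0 le_rfl]
  have h36 : (if n.toList.count '3' = 0 then (none : Option Char) else some '3') ≠ some '6' := by
    split_ifs <;> simp
  rw [segRun '6' _ h36 _ _ _ _ (by positivity)]
  have h69 : (if n.toList.count '6' = 0 then
      (if n.toList.count '3' = 0 then (none : Option Char) else some '3') else some '6') ≠ some '9' := by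
    split_ifs <;> simp
  rw [segRun '9' _ h69 _ _ _ _ (by positivity)]
  have d3 : dgt '3' = 3 := by decide
  have d6 : dgt '6' = 6 := by decide
  have d9 : dgt '9' = 9 := by decide
  simp only [sel3, d3, d6, d9]

-- ===== VERDICT (by name: the statement is the Claim_ definition above) =====
theorem count_threes_spec : Claim_equal_count_threes := by
  intro n _
  unfold Spec_count_threes count_threes
  have hd0 : aInitDict = mkd 0 0 0 := by decide
  rw [hd0, countA_fold n.toList 0 0 0]
  simp only [zero_add]
  rw [final_select, alt_eq_sel3]
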